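-- pv_equiv track=rewrite | github.com/HadjSassi/geekshack3 | scode/teamRAM/prob20/main.py | favorable
-- ===== SOURCE A (Python) =====
-- def favorable(gridd, player):
--     rows = len(gridd)
--     cols = len(gridd[0])
--
--     def ctrll(lig, col, r, c):
--         for i in range(3):
--             lig += r
--             col += c
--             if not (0 <= lig < rows and 0 <= col < cols) or gridd[lig][col] != player:
--                 return False
--         return True
--
--     for lig in range(rows):
--         for colonne in range(cols):
--             if gridd[lig][colonne] == 0:
--                 if colonne <= cols - 4 and ctrll(lig, colonne, 0, 1):
--                     return True
--                 if lig <= rows - 4 and ctrll(lig, colonne, 1, 0):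
--                     return True
--                 if lig <= rows - 4 and colonne <= cols - 4 and ctrll(lig, colonne, 1, 1):
--                     return True
--                 if lig >= 3 and colonne <= cols - 4 and ctrll(lig, colonne, -1, 1):
--                     return True
--
--     return False
-- ===== SOURCE B (Python) =====
-- def favorable(gridd, player):
--     cols = len(gridd[0])
--     gridd = [row[:cols] for row in gridd]
--
--     def step(row, prev, shift):
--         nxt = prev[shift:] + [0] * shift
--         return [n + 1 if x == player else 0 for x, n in zip(row, nxt)]
--
--     def build_up(rows, shift):   # value at (i,j) is 1 + value at (i+1, j+shift) while cells == player
--         if not rows: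
--             return []
--         rest = build_up(rows[1:], shift)
--         prev = rest[0] if rest else [0] * cols
--         return [step(rows[0], prev, shift)] + rest
--
--     def build_down(rows, shift):  # value at (i,j) is 1 + value at (i-1, j+shift) while cells == player
--         out = []
--         prev = [0] * cols
--         for row in rows:
--             cur = step(row, prev, shift)
--             out.append(cur)
--             prev = cur
--         return out
--
--     def scan_row(row):            # h[j] = length of run of player cells starting at j going right
--         h = [0]
--         for x in reversed(row):
--             h.insert(0, h[0] + 1 if x == player else 0)
--         return h
--
--     H = [scan_row(r) for r in gridd]
--     V = build_up(gridd, 0)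
--     D = build_up(gridd, 1)
--     U = build_down(gridd, 1)
--
--     def at(table, i, j):
--         if 0 <= i < len(table) and 0 <= j < len(table[i]):
--             return table[i][j]
--         return 0
--
--     for i, row in enumerate(gridd):
--         for j, x in enumerate(row):
--             if x == 0 and (at(H, i, j + 1) >= 3 or at(V, i + 1, j) >= 3
--                            or at(D, i + 1, j + 1) >= 3 or at(U, i - 1, j + 1) >= 3):
--                 return True
--     return False
-- ===== Notes on version B (the rewrite author's own statement) =====
-- stated objective: alternative
-- what changed: Replaces A's per-empty-cell probing of fixed 3-cell windows via the mutating helper ctrll (with its redundant bound guards) by four precomputed directional run-length DP tables (a right-to-left scan per row, structural-recursion/fold passes over the rows for the vertical and the two diagonal directions) followed by a single neighbour-lookup scan over the empty cells.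
-- outside the precondition, e.g. on favorable([[0, 1, 1, 1], [9]], 1): A returns True, B returns True; on favorable([[1, 1], [1]], 1): A raises IndexError, B returns False; on favorable([], 1): A raises IndexError, B raises IndexError
import Mathlib
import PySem

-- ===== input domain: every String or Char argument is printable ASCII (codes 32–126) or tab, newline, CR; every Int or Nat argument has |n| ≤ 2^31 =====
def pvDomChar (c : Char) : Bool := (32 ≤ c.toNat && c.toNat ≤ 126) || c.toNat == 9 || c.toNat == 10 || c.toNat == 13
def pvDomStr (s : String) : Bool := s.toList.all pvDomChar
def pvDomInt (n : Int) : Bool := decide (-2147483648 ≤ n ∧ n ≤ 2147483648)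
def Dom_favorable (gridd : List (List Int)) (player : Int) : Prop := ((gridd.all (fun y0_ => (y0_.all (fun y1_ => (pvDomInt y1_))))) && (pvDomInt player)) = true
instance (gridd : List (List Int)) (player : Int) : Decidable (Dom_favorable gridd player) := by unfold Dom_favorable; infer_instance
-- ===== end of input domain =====

-- B replaces per-cell window probing by four directional run-length DP tables plus one scan
-- over empty cells (alternative decomposition, same asymptotic cost).

-- ===== PORT A =====
-- helper ctrll, fuel 3 = Python's 'for i in range(3)' with the mutated lig/col as arguments
def pvCtrll (gridd : List (List Int)) (rows cols player : Int) :
    Nat → Int → Int → Int → Int → Bool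
  | 0, _, _, _, _ => true
  | n + 1, lig, col, r, c =>
    let lig' := lig + r
    let col' := col + c
    if ¬(0 ≤ lig' ∧ lig' < rows ∧ 0 ≤ col' ∧ col' < cols) then false
    else if ((gridd.getD lig'.toNat []).getD col'.toNat 0) ≠ player then false
    else pvCtrll gridd rows cols player n lig' col' r c

-- indexing is via getD: exact inside Pre_ (non-empty, rectangular), where every access is in range
def favorable (gridd : List (List Int)) (player : Int) : Bool :=
  let rows : Int := gridd.length
  let cols : Int := (gridd.headD []).length
  (List.range gridd.length).any fun lig =>
    (List.range (gridd.headD []).length).any fun colonne =>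
      if (gridd.getD lig []).getD colonne 0 = 0 then
        (decide ((colonne : Int) ≤ cols - 4) && pvCtrll gridd rows cols player 3 lig colonne 0 1) ||
        (decide ((lig : Int) ≤ rows - 4) && pvCtrll gridd rows cols player 3 lig colonne 1 0) ||
        (decide ((lig : Int) ≤ rows - 4) && decide ((colonne : Int) ≤ cols - 4) &&
          pvCtrll gridd rows cols player 3 lig colonne 1 1) ||
        (decide (3 ≤ (lig : Int)) && decide ((colonne : Int) ≤ cols - 4) &&
          pvCtrll gridd rows cols player 3 lig colonne (-1) 1)
      else false

-- ===== PORT B =====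
-- step(row, prev, shift) of Source B
def pvStep (player : Int) (row prev : List Int) (shift : Nat) : List Int :=
  let nxt := prev.drop shift ++ List.replicate shift 0
  (row.zip nxt).map fun xn => if xn.1 = player then xn.2 + 1 else 0

-- build_up of Source B: structural recursion on the row list
def pvBuildUp (player : Int) (cols shift : Nat) : List (List Int) → List (List Int)
  | [] => []
  | r :: rs =>
    let rest := pvBuildUp player cols shift rs
    pvStep player r (rest.headD (List.replicate cols 0)) shift :: rest

-- build_down of Source B: fold carrying (out, prev)
def pvBuildDown (player : Int) (cols shift : Nat) (rows : List (List Int)) : List (List Int) :=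
  (rows.foldl
      (fun (acc : List (List Int) × List Int) row =>
        let cur := pvStep player row acc.2 shift
        (acc.1 ++ [cur], cur))
      (([] : List (List Int)), List.replicate cols 0)).1

-- scan_row of Source B: loop over reversed(row), pushing at the front
def pvScanRow (player : Int) (row : List Int) : List Int :=
  row.reverse.foldl (fun h x => (if x = player then h.headD 0 + 1 else 0) :: h) [0]

-- at(table, i, j) of Source B
def pvAt (t : List (List Int)) (i j : Int) : Int :=
  if 0 ≤ i ∧ i < (t.length : Int) ∧ 0 ≤ j ∧ j < ((t.getD i.toNat []).length : Int) then
    (t.getD i.toNat []).getD j.toNat 0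
  else 0

def favorable_alt (gridd : List (List Int)) (player : Int) : Bool :=
  let cols := (gridd.headD []).length
  let gridd := gridd.map (fun row => PySem.List.slice row none (some (cols : Int)))
  let H := gridd.map (pvScanRow player)
  let V := pvBuildUp player cols 0 gridd
  let D := pvBuildUp player cols 1 gridd
  let U := pvBuildDown player cols 1 gridd
  (PySem.List.enumerate gridd 0).any fun irow =>
    (PySem.List.enumerate irow.2 0).any fun jx =>
      jx.2 == 0 &&
        (decide (3 ≤ pvAt H irow.1 (jx.1 + 1)) || decide (3 ≤ pvAt V (irow.1 + 1) jx.1) ||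
         decide (3 ≤ pvAt D (irow.1 + 1) (jx.1 + 1)) ||
         decide (3 ≤ pvAt U (irow.1 - 1) (jx.1 + 1)))

-- ===== PRECONDITION & SPEC =====
-- Pre_ restricts to the natural domain: a non-empty grid whose rows are at least as long as row 0
-- (the board width A reads).  A raises IndexError on [] and, unless an earlier window makes it
-- return True first, on any row shorter than row 0 — that scan-order-dependent corner is excluded.
def Pre_favorable (gridd : List (List Int)) (player : Int) : Prop :=
  gridd ≠ [] ∧ ∀ row ∈ gridd, (gridd.headD []).length ≤ row.length
instance (gridd : List (List Int)) (player : Int) : Decidable (Pre_favorable gridd player) := by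
  unfold Pre_favorable; infer_instance

def pvWitness_favorable : List (List Int) × Int := ([[0, 1, 1, 1], [2, 0, 1, 0]], 1)

def Spec_favorable (gridd : List (List Int)) (player : Int) (out : Bool) : Prop :=
  out = favorable_alt gridd player
instance (gridd : List (List Int)) (player : Int) (out : Bool) :
    Decidable (Spec_favorable gridd player out) := by unfold Spec_favorable; infer_instance

-- ===== CLAIM (what is proved, stated in full; the proofs are below) =====
def Claim_equal_favorable : Prop := ∀ (gridd : List (List Int)) (player : Int),
  Dom_favorable gridd player → Pre_favorable gridd player →
  Spec_favorable gridd player (favorable gridd player)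

-- ===== LEMMAS AND PROOFS =====

-- grid cell with getD defaults (proof-side shorthand)
def gcell (g : List (List Int)) (i j : Nat) : Int := (g.getD i []).getD j 0

-- rectangularity
def Rect (g : List (List Int)) (m : Nat) : Prop := ∀ row ∈ g, row.length = m

-- length of a rightward run of player cells at the head of a list
def runFrom (p : Int) : List Int → Int
  | [] => 0
  | x :: t => if x = p then runFrom p t + 1 else 0

lemma runFrom_nonneg (p : Int) (l : List Int) : 0 ≤ runFrom p l := by
  induction l with
  | nil => simp [runFrom]
  | cons x t ih => simp only [runFrom]; split <;> omega

lemma getD_drop {α : Type} (l : List α) (a b : Nat) (d : α) :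
    (l.drop a).getD b d = l.getD (a + b) d := by
  simp [List.getD_eq_getElem?_getD, List.getElem?_drop]

lemma runFrom_ge3 (p : Int) (l : List Int) :
    3 ≤ runFrom p l ↔ 2 < l.length ∧ l.getD 0 0 = p ∧ l.getD 1 0 = p ∧ l.getD 2 0 = p := by
  match l with
  | [] => simp [runFrom]
  | [x] =>
    have h0 : runFrom p [] = 0 := rfl
    simp only [runFrom]; split <;> simp
  | [x, y] =>
    simp only [runFrom]; split <;> (try split) <;> simp
  | x :: y :: z :: t =>
    have h := runFrom_nonneg p t
    simp only [runFrom]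
    constructor
    · intro h3
      by_cases hx : x = p <;> by_cases hy : y = p <;> by_cases hz : z = p <;>
        simp [hx, hy, hz] at h3 ⊢ <;> omega
    · rintro ⟨-, hx, hy, hz⟩
      simp at hx hy hz
      simp [hx, hy, hz]; omega


-- ---- the horizontal table (scan_row) ----

lemma pvScanRow_eq_foldr (p : Int) (row : List Int) :
    pvScanRow p row = row.foldr (fun x h => (if x = p then h.headD 0 + 1 else 0) :: h) [0] := by
  simp [pvScanRow, List.foldl_reverse]

lemma scanRow_getD (p : Int) (row : List Int) :
    ∀ k, (pvScanRow p row).getD k 0 = runFrom p (row.drop k) := by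
  induction row with
  | nil => intro k; cases k <;> simp [pvScanRow_eq_foldr, runFrom]
  | cons x t ih =>
    intro k
    have hstep : pvScanRow p (x :: t)
        = (if x = p then (pvScanRow p t).headD 0 + 1 else 0) :: pvScanRow p t := by
      simp [pvScanRow_eq_foldr]
    cases k with
    | zero =>
      have hh : (pvScanRow p t).headD 0 = runFrom p t := by
        have h0 := ih 0
        cases hs : pvScanRow p t with
        | nil => simpa [hs] using h0
        | cons a as => simpa [hs] using h0
      rw [hstep]
      simp only [List.drop_zero, List.getD_cons_zero, runFrom, hh]
    | succ k =>
      rw [hstep]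
      simpa [List.getD_eq_getElem?_getD] using ih k

lemma length_scanRow (p : Int) (row : List Int) :
    (pvScanRow p row).length = row.length + 1 := by
  induction row with
  | nil => simp [pvScanRow_eq_foldr]
  | cons x t ih =>
    have hstep : pvScanRow p (x :: t)
        = (if x = p then (pvScanRow p t).headD 0 + 1 else 0) :: pvScanRow p t := by
      simp [pvScanRow_eq_foldr]
    simp [hstep, ih]

-- ---- the vertical/diagonal tables ----

-- intended value of a buildUp table entry: run length down the rows, drifting right by shift
def upSpec (p : Int) (s m : Nat) : List (List Int) → Nat → Int
  | [], _ => 0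
  | r :: rs, j => if j < m ∧ r.getD j 0 = p then upSpec p s m rs (j + s) + 1 else 0

lemma upSpec_nonneg (p : Int) (s m : Nat) (g : List (List Int)) (j : Nat) :
    0 ≤ upSpec p s m g j := by
  induction g generalizing j with
  | nil => simp [upSpec]
  | cons r rs ih =>
    simp only [upSpec]
    split
    · have := ih (j + s); omega
    · omega

lemma length_step (p : Int) (s m : Nat) (row prev : List Int)
    (hr : row.length = m) (hp : prev.length = m) :
    (pvStep p row prev s).length = m := by
  simp [pvStep, hr, hp]; omega

lemma step_getD (p : Int) (s m : Nat) (row prev : List Int)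
    (hr : row.length = m) (hp : prev.length = m) (j : Nat) :
    (pvStep p row prev s).getD j 0
      = if j < m ∧ row.getD j 0 = p then prev.getD (j + s) 0 + 1 else 0 := by
  have hnlen : (prev.drop s ++ List.replicate s 0).length = (m - s) + s := by simp [hp]
  have hzlen : (row.zip (prev.drop s ++ List.replicate s 0)).length = m := by
    simp only [List.length_zip, hr, hnlen]; omega
  by_cases hj : j < m
  · have hj' : j < (pvStep p row prev s).length := by
      simpa only [pvStep, List.length_map, hzlen] using hj
    rw [List.getD_eq_getElem _ _ hj']
    simp only [pvStep, List.getElem_map, List.getElem_zip]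
    have hrow : row[j]'(by omega) = row.getD j 0 :=
      (List.getD_eq_getElem _ _ (by omega)).symm
    have hnxt : (prev.drop s ++ List.replicate s 0)[j]'(by omega)
        = prev.getD (j + s) 0 := by
      by_cases hjs : j < m - s
      · rw [List.getElem_append_left (by simp [hp]; omega)]
        rw [List.getElem_drop, List.getD_eq_getElem _ _ (by omega)]
        congr 1; omega
      · rw [List.getElem_append_right (by simp [hp]; omega)]
        simp only [List.getElem_replicate]
        rw [List.getD_eq_default _ _ (by omega)]
    rw [hrow, hnxt]
    simp [hj]
  · rw [List.getD_eq_default, if_neg (by omega)]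
    rw [length_step p s m row prev hr hp]; omega

lemma buildUp_rows_length (p : Int) (s m : Nat) (g : List (List Int)) (hg : Rect g m) :
    ∀ row ∈ pvBuildUp p m s g, row.length = m := by
  induction g with
  | nil => simp [pvBuildUp]
  | cons r rs ih =>
    have hrs : Rect rs m := fun row h => hg row (List.mem_cons_of_mem _ h)
    intro row hrow
    simp only [pvBuildUp, List.mem_cons] at hrow
    rcases hrow with h | h
    · subst h
      apply length_step
      · exact hg r List.mem_cons_self
      · cases hrest : pvBuildUp p m s rs with
        | nil => simp
        | cons a as =>
          simp only [List.headD_cons]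
          exact ih hrs a (by rw [hrest]; exact List.mem_cons_self)
    · exact ih hrs row h

lemma headD_buildUp_getD (p : Int) (s m : Nat) (g : List (List Int)) (hg : Rect g m) (j : Nat) :
    ((pvBuildUp p m s g).headD (List.replicate m 0)).getD j 0 = upSpec p s m g j := by
  induction g generalizing j with
  | nil => simp [pvBuildUp, upSpec, List.getD_eq_getElem?_getD]
  | cons r rs ih =>
    have hrs : Rect rs m := fun row h => hg row (List.mem_cons_of_mem _ h)
    have hprevlen : ((pvBuildUp p m s rs).headD (List.replicate m 0)).length = m := by
      cases hrest : pvBuildUp p m s rs with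
      | nil => simp
      | cons a as =>
        simp only [List.headD_cons]
        exact buildUp_rows_length p s m rs hrs a (by rw [hrest]; exact List.mem_cons_self)
    simp only [pvBuildUp, List.headD_cons]
    rw [step_getD p s m r _ (hg r List.mem_cons_self) hprevlen j]
    simp only [upSpec]
    rw [ih hrs (j + s)]

lemma buildUp_drop (p : Int) (s m : Nat) (g : List (List Int)) :
    ∀ i, (pvBuildUp p m s g).drop i = pvBuildUp p m s (g.drop i) := by
  induction g with
  | nil => intro i; simp [pvBuildUp]
  | cons r rs ih =>
    intro i
    cases i with
    | zero => simp
    | succ i => simpa [pvBuildUp] using ih i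

lemma length_buildUp (p : Int) (s m : Nat) (g : List (List Int)) :
    (pvBuildUp p m s g).length = g.length := by
  induction g with
  | nil => rfl
  | cons r rs ih => simp [pvBuildUp, ih]

lemma getD_buildUp (p : Int) (s m : Nat) (g : List (List Int)) (hg : Rect g m)
    (a j : Nat) (ha : a < g.length) :
    ((pvBuildUp p m s g).getD a []).getD j 0 = upSpec p s m (g.drop a) j := by
  have hdropne : g.drop a ≠ [] := by
    simp [List.drop_eq_nil_iff]; omega
  have h1 : (pvBuildUp p m s g).getD a [] = ((pvBuildUp p m s g).drop a).headD [] := by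
    cases hd : (pvBuildUp p m s g).drop a with
    | nil =>
      exfalso
      have := congrArg List.length hd
      simp [length_buildUp] at this; omega
    | cons b bs =>
      have : (pvBuildUp p m s g)[a]? = some b := by
        rw [← List.head?_drop, hd]; rfl
      simp [List.getD_eq_getElem?_getD, this]
  rw [h1, buildUp_drop]
  cases hd : g.drop a with
  | nil => exact absurd hd hdropne
  | cons r rs =>
    have hrect : Rect (g.drop a) m := fun row h => hg row (List.mem_of_mem_drop h)
    have := headD_buildUp_getD p s m (g.drop a) hrect j
    rw [hd] at this
    simpa [pvBuildUp] using this

lemma upSpec_ge3 (p : Int) (s m : Nat) (g : List (List Int)) (j : Nat) :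
    3 ≤ upSpec p s m g j
      ↔ 2 < g.length ∧ j < m ∧ j + s < m ∧ j + 2 * s < m
          ∧ gcell g 0 j = p ∧ gcell g 1 (j + s) = p ∧ gcell g 2 (j + 2 * s) = p := by
  match g with
  | [] => simp [upSpec]
  | [r] =>
    constructor
    · intro h3; simp only [upSpec] at h3; split at h3 <;> omega
    · rintro ⟨h, -⟩; simp at h
  | [r, q] =>
    constructor
    · intro h3
      simp only [upSpec] at h3
      split at h3
      · split at h3 <;> omega
      · omega
    · rintro ⟨h, -⟩; simp at h
  | r :: q :: w :: t =>
    simp only [upSpec]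
    constructor
    · intro h3
      rcases Decidable.em (j < m ∧ r.getD j 0 = p) with h1 | h1
      · rw [if_pos h1] at h3
        rcases Decidable.em (j + s < m ∧ q.getD (j + s) 0 = p) with h2 | h2
        · rw [if_pos h2] at h3
          rcases Decidable.em (j + s + s < m ∧ w.getD (j + s + s) 0 = p) with h3c | h3c
          · refine ⟨by simp, h1.1, h2.1, by omega, ?_, ?_, ?_⟩
            · simpa [gcell] using h1.2
            · simpa [gcell] using h2.2
            · have := h3c.2
              simp only [gcell, List.getD_cons_succ, List.getD_cons_zero]
              rw [show j + 2 * s = j + s + s by omega]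
              simpa [gcell] using this
          · rw [if_neg h3c] at h3; omega
        · rw [if_neg h2] at h3; omega
      · rw [if_neg h1] at h3; omega
    · rintro ⟨-, hm1, hm2, hm3, c1, c2, c3⟩
      simp only [gcell, List.getD_cons_succ, List.getD_cons_zero] at c1 c2 c3
      have hnn := upSpec_nonneg p s m t (j + s + s + s)
      rw [if_pos ⟨hm1, c1⟩, if_pos ⟨hm2, c2⟩,
        if_pos ⟨by omega, by rw [show j + s + s = j + 2 * s by omega]; exact c3⟩]
      omega

-- ---- build_down as a reversed build_up ----

def auxD (p : Int) (s : Nat) : List Int → List (List Int) → List (List Int)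
  | _, [] => []
  | prev, r :: rs => pvStep p r prev s :: auxD p s (pvStep p r prev s) rs

lemma foldl_buildDown (p : Int) (s : Nat) :
    ∀ (g : List (List Int)) (acc : List (List Int)) (prev : List Int),
      (g.foldl
          (fun (a : List (List Int) × List Int) row =>
            (a.1 ++ [pvStep p row a.2 s], pvStep p row a.2 s))
          (acc, prev)).1 = acc ++ auxD p s prev g := by
  intro g
  induction g with
  | nil => intro acc prev; simp [auxD]
  | cons r rs ih =>
    intro acc prev
    simp only [List.foldl_cons, auxD]
    rw [ih]
    simp

def buildUpFrom (p : Int) (s : Nat) (base : List Int) : List (List Int) → List (List Int)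
  | [] => []
  | r :: rs =>
    let rest := buildUpFrom p s base rs
    pvStep p r (rest.headD base) s :: rest

lemma buildUp_eq_from (p : Int) (s m : Nat) (g : List (List Int)) :
    pvBuildUp p m s g = buildUpFrom p s (List.replicate m 0) g := by
  induction g with
  | nil => rfl
  | cons r rs ih => simp only [pvBuildUp, buildUpFrom, ih]

lemma headD_append_singleton {α : Type} (L : List α) (c b : α) :
    (L ++ [c]).headD b = L.headD c := by
  cases L <;> simp

lemma from_snoc (p : Int) (s : Nat) (base : List Int) (r : List Int) :
    ∀ xs, buildUpFrom p s base (xs ++ [r])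
      = buildUpFrom p s (pvStep p r base s) xs ++ [pvStep p r base s] := by
  intro xs
  induction xs with
  | nil => simp [buildUpFrom]
  | cons x t ih =>
    simp only [List.cons_append, buildUpFrom, ih]
    rw [headD_append_singleton]

lemma auxD_eq_rev (p : Int) (s : Nat) :
    ∀ (g : List (List Int)) (prev : List Int),
      auxD p s prev g = (buildUpFrom p s prev g.reverse).reverse := by
  intro g
  induction g with
  | nil => intro prev; simp [auxD, buildUpFrom]
  | cons r rs ih =>
    intro prev
    simp only [auxD, List.reverse_cons]
    rw [from_snoc]
    simp [ih (pvStep p r prev s)]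

lemma buildDown_eq (p : Int) (m s : Nat) (g : List (List Int)) :
    pvBuildDown p m s g = (pvBuildUp p m s g.reverse).reverse := by
  unfold pvBuildDown
  rw [foldl_buildDown, auxD_eq_rev, buildUp_eq_from]
  simp

-- ---- pvAt characterisations ----

lemma getD_reverse' {α : Type} (l : List α) (k : Nat) (d : α) (hk : k < l.length) :
    l.reverse.getD k d = l.getD (l.length - 1 - k) d := by
  rw [List.getD_eq_getElem _ _ (by simpa using hk),
    List.getD_eq_getElem _ _ (by omega), List.getElem_reverse]

lemma at_buildUp (p : Int) (s m : Nat) (g : List (List Int)) (hg : Rect g m) (a b : Nat) :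
    pvAt (pvBuildUp p m s g) (a : Int) (b : Int) = upSpec p s m (g.drop a) b := by
  have hlen : (pvBuildUp p m s g).length = g.length := length_buildUp p s m g
  by_cases ha : a < g.length
  · have hrowmem : (pvBuildUp p m s g).getD a [] ∈ pvBuildUp p m s g := by
      rw [List.getD_eq_getElem _ _ (by omega)]
      exact List.getElem_mem _
    have hrowlen : ((pvBuildUp p m s g).getD a []).length = m :=
      buildUp_rows_length p s m g hg _ hrowmem
    have hval := getD_buildUp p s m g hg a b ha
    by_cases hb : b < m
    · simp only [pvAt, Int.toNat_natCast, hlen, hrowlen]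
      rw [if_pos (by push_cast; omega)]
      exact hval
    · simp only [pvAt, Int.toNat_natCast, hlen, hrowlen]
      rw [if_neg (by push_cast; omega)]
      cases hd : g.drop a with
      | nil =>
        have := congrArg List.length hd
        simp at this; omega
      | cons r rs => simp [upSpec, hb]
  · simp only [pvAt, Int.toNat_natCast, hlen]
    rw [if_neg (by push_cast; omega)]
    have hnil : g.drop a = [] := by rw [List.drop_eq_nil_iff]; omega
    rw [hnil]
    simp [upSpec]

lemma at_buildDown (p : Int) (s m : Nat) (g : List (List Int)) (hg : Rect g m)
    (a b : Nat) (ha : a < g.length) :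
    pvAt (pvBuildDown p m s g) (a : Int) (b : Int)
      = upSpec p s m ((g.take (a + 1)).reverse) b := by
  have hrev : Rect g.reverse m := fun row h => hg row (List.mem_reverse.mp h)
  rw [buildDown_eq]
  have hlen : (pvBuildUp p m s g.reverse).length = g.length := by
    rw [length_buildUp]; simp
  have hswap : ((pvBuildUp p m s g.reverse).reverse).getD a []
      = (pvBuildUp p m s g.reverse).getD (g.length - 1 - a) [] := by
    rw [getD_reverse' _ _ _ (by simpa [hlen] using ha)]
    simp [hlen]
  have hdrop : (g.reverse).drop (g.length - 1 - a) = (g.take (a + 1)).reverse := by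
    rw [List.drop_reverse]
    congr 1
    congr 1
    omega
  have hval : ((pvBuildUp p m s g.reverse).reverse.getD a []).getD b 0
      = upSpec p s m ((g.take (a + 1)).reverse) b := by
    rw [hswap, getD_buildUp p s m g.reverse hrev _ b (by simp; omega), hdrop]
  have hrowlen : ((pvBuildUp p m s g.reverse).reverse.getD a []).length = m := by
    rw [hswap]
    apply buildUp_rows_length p s m g.reverse hrev
    rw [List.getD_eq_getElem _ _ (by rw [hlen]; omega)]
    exact List.getElem_mem _
  by_cases hb : b < m
  · simp only [pvAt, Int.toNat_natCast, List.length_reverse, hlen, hrowlen]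
    rw [if_pos (by push_cast; omega)]
    exact hval
  · simp only [pvAt, Int.toNat_natCast, List.length_reverse, hlen, hrowlen]
    rw [if_neg (by push_cast; omega)]
    cases hd : (g.take (a + 1)).reverse with
    | nil => simp [upSpec]
    | cons r rs => simp [upSpec, hb]

lemma at_mapScan (p : Int) (m : Nat) (g : List (List Int)) (hg : Rect g m)
    (a b : Nat) (ha : a < g.length) :
    pvAt (g.map (pvScanRow p)) (a : Int) (b : Int) = runFrom p ((g.getD a []).drop b) := by
  have hrow : (g.map (pvScanRow p)).getD a [] = pvScanRow p (g.getD a []) := by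
    rw [List.getD_eq_getElem _ _ (by simpa using ha),
      List.getD_eq_getElem _ _ ha, List.getElem_map]
  have hrl : (g.getD a []).length = m := by
    apply hg
    rw [List.getD_eq_getElem _ _ ha]
    exact List.getElem_mem _
  have hslen : (pvScanRow p (g.getD a [])).length = m + 1 := by
    rw [length_scanRow, hrl]
  by_cases hb : b < m + 1
  · simp only [pvAt, Int.toNat_natCast, List.length_map, hrow, hslen]
    rw [if_pos (by push_cast; omega)]
    rw [scanRow_getD]
  · simp only [pvAt, Int.toNat_natCast, List.length_map, hrow, hslen]
    rw [if_neg (by push_cast; omega)]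
    have : (g.getD a []).drop b = [] := by rw [List.drop_eq_nil_iff]; omega
    rw [this]
    rfl

lemma at_neg (t : List (List Int)) (j : Int) : pvAt t (-1) j = 0 := by
  simp [pvAt]


-- ---- A-side: unfolding ctrll ----

lemma ctrll_iff (g : List (List Int)) (rows cols p lig col r c : Int) :
    pvCtrll g rows cols p 3 lig col r c = true ↔
      ((0 ≤ lig + r ∧ lig + r < rows ∧ 0 ≤ col + c ∧ col + c < cols)
        ∧ (g.getD (lig + r).toNat []).getD (col + c).toNat 0 = p)
      ∧ ((0 ≤ lig + r + r ∧ lig + r + r < rows ∧ 0 ≤ col + c + c ∧ col + c + c < cols)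
        ∧ (g.getD (lig + r + r).toNat []).getD (col + c + c).toNat 0 = p)
      ∧ ((0 ≤ lig + r + r + r ∧ lig + r + r + r < rows ∧ 0 ≤ col + c + c + c ∧ col + c + c + c < cols)
        ∧ (g.getD (lig + r + r + r).toNat []).getD (col + c + c + c).toNat 0 = p) := by
  simp only [pvCtrll]
  split_ifs with h1 h2 h3 h4 h5 h6 <;> simp_all

lemma dirR (g : List (List Int)) (p : Int) (m i j : Nat) (hi : i < g.length) :
    (decide ((j : Int) ≤ (m : Int) - 4) && pvCtrll g (g.length : Int) (m : Int) p 3 (i : Int) (j : Int) 0 1)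
      = decide (j + 3 < m ∧ gcell g i (j + 1) = p ∧ gcell g i (j + 2) = p ∧ gcell g i (j + 3) = p) := by
  rw [Bool.eq_iff_iff]
  simp only [Bool.and_eq_true, decide_eq_true_eq, ctrll_iff, gcell]
  have e1 : ((i : Int) + 0).toNat = i := by omega
  have e2 : ((i : Int) + 0 + 0).toNat = i := by omega
  have e3 : ((i : Int) + 0 + 0 + 0).toNat = i := by omega
  have f1 : ((j : Int) + 1).toNat = j + 1 := by omega
  have f2 : ((j : Int) + 1 + 1).toNat = j + 2 := by omega
  have f3 : ((j : Int) + 1 + 1 + 1).toNat = j + 3 := by omega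
  rw [e1, e2, e3, f1, f2, f3]
  constructor
  · rintro ⟨hg, ⟨-, c1⟩, ⟨-, c2⟩, ⟨-, c3⟩⟩
    exact ⟨by omega, c1, c2, c3⟩
  · rintro ⟨hb, c1, c2, c3⟩
    exact ⟨by omega, ⟨by omega, c1⟩, ⟨by omega, c2⟩, ⟨by omega, c3⟩⟩

lemma dirD (g : List (List Int)) (p : Int) (m i j : Nat) (hj : j < m) :
    (decide ((i : Int) ≤ (g.length : Int) - 4) && pvCtrll g (g.length : Int) (m : Int) p 3 (i : Int) (j : Int) 1 0)
      = decide (i + 3 < g.length ∧ gcell g (i + 1) j = p ∧ gcell g (i + 2) j = p ∧ gcell g (i + 3) j = p) := by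
  rw [Bool.eq_iff_iff]
  simp only [Bool.and_eq_true, decide_eq_true_eq, ctrll_iff, gcell]
  have e1 : ((i : Int) + 1).toNat = i + 1 := by omega
  have e2 : ((i : Int) + 1 + 1).toNat = i + 2 := by omega
  have e3 : ((i : Int) + 1 + 1 + 1).toNat = i + 3 := by omega
  have f1 : ((j : Int) + 0).toNat = j := by omega
  rw [e1, e2, e3, f1]
  constructor
  · rintro ⟨hg, ⟨-, c1⟩, ⟨-, c2⟩, ⟨-, c3⟩⟩
    exact ⟨by omega, c1, c2, c3⟩
  · rintro ⟨hb, c1, c2, c3⟩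
    exact ⟨by omega, ⟨by omega, c1⟩, ⟨by omega, c2⟩, ⟨by omega, c3⟩⟩

lemma dirDR (g : List (List Int)) (p : Int) (m i j : Nat) :
    (decide ((i : Int) ≤ (g.length : Int) - 4) && decide ((j : Int) ≤ (m : Int) - 4)
        && pvCtrll g (g.length : Int) (m : Int) p 3 (i : Int) (j : Int) 1 1)
      = decide (i + 3 < g.length ∧ j + 3 < m
          ∧ gcell g (i + 1) (j + 1) = p ∧ gcell g (i + 2) (j + 2) = p ∧ gcell g (i + 3) (j + 3) = p) := by
  rw [Bool.eq_iff_iff]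
  simp only [Bool.and_eq_true, decide_eq_true_eq, ctrll_iff, gcell]
  have e1 : ((i : Int) + 1).toNat = i + 1 := by omega
  have e2 : ((i : Int) + 1 + 1).toNat = i + 2 := by omega
  have e3 : ((i : Int) + 1 + 1 + 1).toNat = i + 3 := by omega
  have f1 : ((j : Int) + 1).toNat = j + 1 := by omega
  have f2 : ((j : Int) + 1 + 1).toNat = j + 2 := by omega
  have f3 : ((j : Int) + 1 + 1 + 1).toNat = j + 3 := by omega
  rw [e1, e2, e3, f1, f2, f3]
  constructor
  · rintro ⟨⟨hg1, hg2⟩, ⟨-, c1⟩, ⟨-, c2⟩, ⟨-, c3⟩⟩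
    exact ⟨by omega, by omega, c1, c2, c3⟩
  · rintro ⟨hb1, hb2, c1, c2, c3⟩
    exact ⟨⟨by omega, by omega⟩, ⟨by omega, c1⟩, ⟨by omega, c2⟩, ⟨by omega, c3⟩⟩

lemma dirUR (g : List (List Int)) (p : Int) (m i j : Nat) (hi : i < g.length) :
    (decide (3 ≤ (i : Int)) && decide ((j : Int) ≤ (m : Int) - 4)
        && pvCtrll g (g.length : Int) (m : Int) p 3 (i : Int) (j : Int) (-1) 1)
      = decide (3 ≤ i ∧ j + 3 < m
          ∧ gcell g (i - 1) (j + 1) = p ∧ gcell g (i - 2) (j + 2) = p ∧ gcell g (i - 3) (j + 3) = p) := by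
  rw [Bool.eq_iff_iff]
  simp only [Bool.and_eq_true, decide_eq_true_eq, ctrll_iff, gcell]
  have f1 : ((j : Int) + 1).toNat = j + 1 := by omega
  have f2 : ((j : Int) + 1 + 1).toNat = j + 2 := by omega
  have f3 : ((j : Int) + 1 + 1 + 1).toNat = j + 3 := by omega
  rw [f1, f2, f3]
  constructor
  · rintro ⟨⟨hg1, hg2⟩, ⟨-, c1⟩, ⟨-, c2⟩, ⟨-, c3⟩⟩
    have e1 : ((i : Int) + -1).toNat = i - 1 := by omega
    have e2 : ((i : Int) + -1 + -1).toNat = i - 2 := by omega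
    have e3 : ((i : Int) + -1 + -1 + -1).toNat = i - 3 := by omega
    rw [e1] at c1; rw [e2] at c2; rw [e3] at c3
    exact ⟨by omega, by omega, c1, c2, c3⟩
  · rintro ⟨hb1, hb2, c1, c2, c3⟩
    have e1 : ((i : Int) + -1).toNat = i - 1 := by omega
    have e2 : ((i : Int) + -1 + -1).toNat = i - 2 := by omega
    have e3 : ((i : Int) + -1 + -1 + -1).toNat = i - 3 := by omega
    rw [e1, e2, e3]
    exact ⟨⟨by omega, by omega⟩, ⟨by omega, c1⟩, ⟨by omega, c2⟩, ⟨by omega, c3⟩⟩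

-- ---- B-side: the four table lookups, as the same window predicates ----

lemma gcell_drop (g : List (List Int)) (a k j : Nat) :
    gcell (g.drop a) k j = gcell g (a + k) j := by
  simp [gcell, getD_drop]

lemma altH (g : List (List Int)) (p : Int) (m i j : Nat) (hg : Rect g m)
    (hi : i < g.length) :
    3 ≤ pvAt (g.map (pvScanRow p)) (i : Int) ((j : Int) + 1)
      ↔ j + 3 < m ∧ gcell g i (j + 1) = p ∧ gcell g i (j + 2) = p ∧ gcell g i (j + 3) = p := by
  rw [show ((j : Int) + 1) = ((j + 1 : Nat) : Int) by push_cast; ring]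
  rw [at_mapScan p m g hg i (j + 1) hi]
  rw [runFrom_ge3]
  have hrl : (g.getD i []).length = m := by
    apply hg
    rw [List.getD_eq_getElem _ _ hi]
    exact List.getElem_mem _
  simp only [List.length_drop, getD_drop, hrl, gcell]
  constructor
  · rintro ⟨h1, c1, c2, c3⟩
    exact ⟨by omega, c1, by simpa [show j + 1 + 1 = j + 2 by omega] using c2,
      by simpa [show j + 1 + 2 = j + 3 by omega] using c3⟩
  · rintro ⟨h1, c1, c2, c3⟩
    exact ⟨by omega, c1, by simpa [show j + 1 + 1 = j + 2 by omega] using c2,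
      by simpa [show j + 1 + 2 = j + 3 by omega] using c3⟩

lemma altV (g : List (List Int)) (p : Int) (m i j : Nat) (hg : Rect g m) (hj : j < m) :
    3 ≤ pvAt (pvBuildUp p m 0 g) ((i : Int) + 1) (j : Int)
      ↔ i + 3 < g.length ∧ gcell g (i + 1) j = p ∧ gcell g (i + 2) j = p ∧ gcell g (i + 3) j = p := by
  rw [show ((i : Int) + 1) = ((i + 1 : Nat) : Int) by push_cast; ring]
  rw [at_buildUp p 0 m g hg (i + 1) j, upSpec_ge3]
  simp only [gcell_drop, List.length_drop, Nat.add_zero, Nat.mul_zero]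
  constructor
  · rintro ⟨h1, -, -, -, c1, c2, c3⟩
    exact ⟨by omega, by simpa using c1, by simpa [show i + 1 + 1 = i + 2 by omega] using c2,
      by simpa [show i + 1 + 2 = i + 3 by omega] using c3⟩
  · rintro ⟨h1, c1, c2, c3⟩
    exact ⟨by omega, hj, hj, hj, by simpa using c1,
      by simpa [show i + 1 + 1 = i + 2 by omega] using c2,
      by simpa [show i + 1 + 2 = i + 3 by omega] using c3⟩

lemma altD (g : List (List Int)) (p : Int) (m i j : Nat) (hg : Rect g m) :
    3 ≤ pvAt (pvBuildUp p m 1 g) ((i : Int) + 1) ((j : Int) + 1)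
      ↔ i + 3 < g.length ∧ j + 3 < m
        ∧ gcell g (i + 1) (j + 1) = p ∧ gcell g (i + 2) (j + 2) = p ∧ gcell g (i + 3) (j + 3) = p := by
  rw [show ((i : Int) + 1) = ((i + 1 : Nat) : Int) by push_cast; ring,
    show ((j : Int) + 1) = ((j + 1 : Nat) : Int) by push_cast; ring]
  rw [at_buildUp p 1 m g hg (i + 1) (j + 1), upSpec_ge3]
  simp only [gcell_drop, List.length_drop]
  constructor
  · rintro ⟨h1, h2, h3, h4, c1, c2, c3⟩
    exact ⟨by omega, by omega, by simpa using c1,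
      by simpa [show i + 1 + 1 = i + 2 by omega, show j + 1 + 1 = j + 2 by omega] using c2,
      by simpa [show i + 1 + 2 = i + 3 by omega, show j + 1 + 2 * 1 = j + 3 by omega] using c3⟩
  · rintro ⟨h1, h2, c1, c2, c3⟩
    exact ⟨by omega, by omega, by omega, by omega, by simpa using c1,
      by simpa [show i + 1 + 1 = i + 2 by omega, show j + 1 + 1 = j + 2 by omega] using c2,
      by simpa [show i + 1 + 2 = i + 3 by omega, show j + 1 + 2 * 1 = j + 3 by omega] using c3⟩

lemma gcell_take_reverse (g : List (List Int)) (a k j : Nat) (hk : k < a) (ha : a ≤ g.length) :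
    gcell ((g.take a).reverse) k j = gcell g (a - 1 - k) j := by
  have hlen : (g.take a).length = a := by simp; omega
  unfold gcell
  rw [getD_reverse' _ _ _ (by omega), hlen]
  congr 1
  rw [List.getD_eq_getElem _ _ (by omega), List.getD_eq_getElem _ _ (by omega),
    List.getElem_take]

lemma altU (g : List (List Int)) (p : Int) (m i j : Nat) (hg : Rect g m)
    (hi : i < g.length) :
    3 ≤ pvAt (pvBuildDown p m 1 g) ((i : Int) - 1) ((j : Int) + 1)
      ↔ 3 ≤ i ∧ j + 3 < m
        ∧ gcell g (i - 1) (j + 1) = p ∧ gcell g (i - 2) (j + 2) = p ∧ gcell g (i - 3) (j + 3) = p := by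
  cases i with
  | zero =>
    rw [show ((0 : Nat) : Int) - 1 = -1 by ring, at_neg]
    simp
  | succ i' =>
    rw [show (((i' + 1 : Nat)) : Int) - 1 = ((i' : Nat) : Int) by push_cast; ring,
      show ((j : Int) + 1) = ((j + 1 : Nat) : Int) by push_cast; ring]
    rw [at_buildDown p 1 m g hg i' (j + 1) (by omega), upSpec_ge3]
    have hlen : ((g.take (i' + 1)).reverse).length = i' + 1 := by simp; omega
    rw [hlen]
    constructor
    · rintro ⟨h1, h2, h3, h4, c1, c2, c3⟩
      rw [gcell_take_reverse g (i' + 1) 0 _ (by omega) (by omega)] at c1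
      rw [gcell_take_reverse g (i' + 1) 1 _ (by omega) (by omega)] at c2
      rw [gcell_take_reverse g (i' + 1) 2 _ (by omega) (by omega)] at c3
      refine ⟨by omega, by omega, ?_, ?_, ?_⟩
      · simpa [show i' + 1 - 1 - 0 = i' + 1 - 1 by omega] using c1
      · simpa [show i' + 1 - 1 - 1 = i' + 1 - 2 by omega,
          show j + 1 + 1 = j + 2 by omega] using c2
      · simpa [show i' + 1 - 1 - 2 = i' + 1 - 3 by omega,
          show j + 1 + 2 * 1 = j + 3 by omega] using c3
    · rintro ⟨h1, h2, c1, c2, c3⟩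
      refine ⟨by omega, by omega, by omega, by omega, ?_, ?_, ?_⟩
      · rw [gcell_take_reverse g (i' + 1) 0 _ (by omega) (by omega)]
        simpa [show i' + 1 - 1 - 0 = i' + 1 - 1 by omega] using c1
      · rw [gcell_take_reverse g (i' + 1) 1 _ (by omega) (by omega)]
        simpa [show i' + 1 - 1 - 1 = i' + 1 - 2 by omega,
          show j + 1 + 1 = j + 2 by omega] using c2
      · rw [gcell_take_reverse g (i' + 1) 2 _ (by omega) (by omega)]
        simpa [show i' + 1 - 1 - 2 = i' + 1 - 3 by omega,
          show j + 1 + 2 * 1 = j + 3 by omega] using c3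

-- ---- outer loops: enumerate vs range ----

lemma any_congr' {α : Type} (l : List α) (f g : α → Bool) (h : ∀ x ∈ l, f x = g x) :
    l.any f = l.any g := by
  induction l with
  | nil => rfl
  | cons x t ih =>
    simp only [List.any_cons]
    rw [h x List.mem_cons_self, ih fun y hy => h y (List.mem_cons_of_mem _ hy)]

lemma enum_any {α : Type} (f : Int × α → Bool) (dflt : α) :
    ∀ (xs : List α) (s : Nat),
      (PySem.List.enumerate xs (s : Int)).any f
        = (List.range xs.length).any (fun k => f (((s + k : Nat) : Int), xs.getD k dflt)) := by
  intro xs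
  induction xs with
  | nil => intro s; simp [PySem.List.enumerate]
  | cons x t ih =>
    intro s
    rw [PySem.List.enumerate_cons]
    simp only [List.any_cons]
    rw [show ((s : Int) + 1) = ((s + 1 : Nat) : Int) by push_cast; ring, ih (s + 1)]
    rw [show (x :: t).length = t.length + 1 from rfl, List.range_succ_eq_map]
    simp only [List.any_cons, List.any_map, List.getD_cons_zero, Nat.add_zero]
    congr 1
    apply any_congr'
    intro k hk
    simp only [Function.comp_apply, List.getD_cons_succ]
    congr 2
    omega

lemma enum_any0 {α : Type} (f : Int × α → Bool) (dflt : α) (xs : List α) :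
    (PySem.List.enumerate xs 0).any f
      = (List.range xs.length).any (fun k => f ((k : Int), xs.getD k dflt)) := by
  have h := enum_any f dflt xs 0
  simpa using h








-- ===== VERDICT (by name: the statement is the Claim_ definition above) =====
-- ---- trimming: A only reads the first cols cells of each row ----

lemma cell_trim (g : List (List Int)) (m a b : Nat) (hb : b < m) :
    gcell (g.map (List.take m)) a b = gcell g a b := by
  unfold gcell
  simp only [List.getD_eq_getElem?_getD, List.getElem?_map]
  cases g[a]? with
  | none => rfl
  | some r =>
    simp only [Option.map_some, Option.getD_some]
    rw [List.getElem?_take]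
    simp [hb]

lemma ctrll_trim (g : List (List Int)) (p : Int) (m : Nat) (lig col r c : Int) :
    pvCtrll (g.map (List.take m)) (g.length : Int) (m : Int) p 3 lig col r c
      = pvCtrll g (g.length : Int) (m : Int) p 3 lig col r c := by
  have hcell : ∀ (X Y : Int), 0 ≤ X → X < (g.length : Int) → 0 ≤ Y → Y < (m : Int) →
      ((g.map (List.take m)).getD X.toNat []).getD Y.toNat 0
        = (g.getD X.toNat []).getD Y.toNat 0 := by
    intro X Y _ _ _ hY
    have := cell_trim g m X.toNat Y.toNat (by omega)
    simpa [gcell] using this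
  rw [Bool.eq_iff_iff, ctrll_iff, ctrll_iff]
  constructor
  · rintro ⟨⟨b1, c1⟩, ⟨b2, c2⟩, ⟨b3, c3⟩⟩
    rw [hcell _ _ b1.1 b1.2.1 b1.2.2.1 b1.2.2.2] at c1
    rw [hcell _ _ b2.1 b2.2.1 b2.2.2.1 b2.2.2.2] at c2
    rw [hcell _ _ b3.1 b3.2.1 b3.2.2.1 b3.2.2.2] at c3
    exact ⟨⟨b1, c1⟩, ⟨b2, c2⟩, ⟨b3, c3⟩⟩
  · rintro ⟨⟨b1, c1⟩, ⟨b2, c2⟩, ⟨b3, c3⟩⟩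
    rw [← hcell _ _ b1.1 b1.2.1 b1.2.2.1 b1.2.2.2] at c1
    rw [← hcell _ _ b2.1 b2.2.1 b2.2.2.1 b2.2.2.2] at c2
    rw [← hcell _ _ b3.1 b3.2.1 b3.2.2.1 b3.2.2.2] at c3
    exact ⟨⟨b1, c1⟩, ⟨b2, c2⟩, ⟨b3, c3⟩⟩

lemma headD_trim (g : List (List Int)) (hne : g ≠ [])
    (hge : ∀ row ∈ g, (g.headD []).length ≤ row.length) :
    ((g.map (List.take (g.headD []).length)).headD []).length = (g.headD []).length := by
  cases g with
  | nil => exact absurd rfl hne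
  | cons r rs =>
    simp only [List.map_cons, List.headD_cons, List.length_take]
    have := hge r List.mem_cons_self
    simp only [List.headD_cons] at this ⊢
    omega

lemma favorable_trim (g : List (List Int)) (p : Int) (hne : g ≠ [])
    (hge : ∀ row ∈ g, (g.headD []).length ≤ row.length) :
    favorable g p = favorable (g.map (List.take (g.headD []).length)) p := by
  simp only [favorable]
  rw [headD_trim g hne hge, List.length_map]
  apply any_congr'
  intro i hi
  rw [List.mem_range] at hi
  apply any_congr'
  intro j hj
  rw [List.mem_range] at hj
  have hcell := cell_trim g (g.headD []).length i j hj
  rw [ctrll_trim g p (g.headD []).length, ctrll_trim, ctrll_trim, ctrll_trim]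
  unfold gcell at hcell
  rw [hcell]

-- the heart of the proof: on a rectangular grid the two table scans agree with A's probing
lemma equiv_rect (g : List (List Int)) (p : Int) (hne : g ≠ [])
    (hrect : ∀ row ∈ g, row.length = (g.headD []).length) :
    favorable g p = favorable_alt g p := by
  have htrim : g.map (fun row => List.take (g.headD []).length row) = g := by
    conv_rhs => rw [← List.map_id g]
    apply List.map_congr_left
    intro r hr
    exact List.take_of_length_le (hrect r hr).le
  simp only [favorable, favorable_alt, PySem.List.slice_to_natCast, htrim]
  rw [enum_any0 _ ([] : List Int) g]
  apply any_congr'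
  intro i hi
  rw [List.mem_range] at hi
  rw [enum_any0 _ (0 : Int) (g.getD i [])]
  have hrl : (g.getD i []).length = (g.headD []).length := by
    apply hrect
    rw [List.getD_eq_getElem _ _ hi]
    exact List.getElem_mem _
  rw [hrl]
  apply any_congr'
  intro j hj
  rw [List.mem_range] at hj
  by_cases hc : (g.getD i []).getD j 0 = 0
  · rw [if_pos hc]
    have hb : ((g.getD i []).getD j 0 == 0) = true := by
      simp only [beq_iff_eq]; exact hc
    rw [hb, Bool.true_and]
    rw [dirR g p (g.headD []).length i j hi,
      dirD g p (g.headD []).length i j hj,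
      dirDR g p (g.headD []).length i j,
      dirUR g p (g.headD []).length i j hi]
    rw [Bool.eq_iff_iff]
    simp only [Bool.or_eq_true, decide_eq_true_eq]
    rw [altH g p (g.headD []).length i j hrect hi,
      altV g p (g.headD []).length i j hrect hj,
      altD g p (g.headD []).length i j hrect,
      altU g p (g.headD []).length i j hrect hi]
  · rw [if_neg hc]
    have hb : ((g.getD i []).getD j 0 == 0) = false := by
      simp only [beq_eq_false_iff_ne, ne_eq]; exact hc
    rw [hb, Bool.false_and]

lemma alt_trim (g : List (List Int)) (p : Int) (hne : g ≠ [])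
    (hge : ∀ row ∈ g, (g.headD []).length ≤ row.length) :
    favorable_alt g p = favorable_alt (g.map (List.take (g.headD []).length)) p := by
  simp only [favorable_alt, PySem.List.slice_to_natCast]
  rw [headD_trim g hne hge]
  rw [show (g.map (List.take (g.headD []).length)).map
        (fun row => List.take (g.headD []).length row)
      = g.map (fun row => List.take (g.headD []).length row) by
    rw [List.map_map]
    apply List.map_congr_left
    intro r _
    simp [List.take_take]]

-- ===== VERDICT (by name: the statement is the Claim_ definition above) =====
theorem favorable_spec : Claim_equal_favorable := by
  intro g p _hdom hpre
  obtain ⟨hne, hrect⟩ := hpre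
  unfold Spec_favorable
  have hne' : g.map (List.take (g.headD []).length) ≠ [] := by
    simpa using hne
  have hhead := headD_trim g hne hrect
  have hrect' : ∀ row ∈ g.map (List.take (g.headD []).length),
      row.length = ((g.map (List.take (g.headD []).length)).headD []).length := by
    intro row hrow
    rw [hhead]
    obtain ⟨r, hr, rfl⟩ := List.mem_map.mp hrow
    have := hrect r hr
    simp only [List.length_take]
    omega
  rw [favorable_trim g p hne hrect, alt_trim g p hne hrect,
    equiv_rect _ p hne' hrect']
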